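-- pv_equiv track=rewrite | github.com/shrave/Malicious-URL-Classifier | features/lexical.py | suspicious_word_count
-- ===== SOURCE A (Python) =====
-- def getTokens(url):
-- 	tokensBySlash = str(url.encode('utf-8')).split('/')	#get tokens after splitting by slash
-- 	allTokens = []
-- 	for i in tokensBySlash:
-- 		tokens = str(i).split('-')	#get tokens after splitting by dash
-- 		tokensByDot = []
-- 		for j in range(0,len(tokens)):
-- 			tempTokens = str(tokens[j]).split('.')	#get tokens after splitting by dot
-- 			tokensByDot = tokensByDot + tempTokens
-- 		allTokens = allTokens + tokens + tokensByDot
-- 	allTokens = list(set(allTokens))	#remove redundant tokens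
-- 	if 'com' in allTokens:
-- 		allTokens.remove('com')	#removing .com since it occurs a lot of times and it should not be included in our features
-- 	return allTokens
--
-- def suspicious_word_count(url):
--     tokens_words=getTokens(url)
--     sec_sen_words=['confirm', 'account', 'banking', 'secure', 'ebayisapi', 'webscr', 'login', 'signin']
--     cnt=0
--     for ele in sec_sen_words:
--         if(ele in tokens_words):
--             cnt+=1;
--     return cnt
-- ===== SOURCE B (Python) =====
-- def suspicious_word_count(url):
--     s = str(url.encode('utf-8'))
--     n = len(s)
--     def hit(w):
--         m = len(w)
--         return any(s[i:i+m] == w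
--                    and (i == 0 or s[i-1] in '-./')
--                    and (i + m == n or s[i+m] in '-./')
--                    for i in range(n - m + 1))
--     return sum(1 for w in ('confirm', 'account', 'banking', 'secure',
--                            'ebayisapi', 'webscr', 'login', 'signin') if hit(w))
-- ===== Notes on version B (the rewrite author's own statement) =====
-- stated objective: alternative
-- what changed: Instead of A's nested tokenization (split by slash, then dash, then dot, concatenating token lists, deduping with set() and removing the common domain token) B never builds tokens: for each of the 8 suspicious words it scans the encoded-bytes repr string for a substring occurrence bounded on both sides by one of the three delimiters or a string end; this coincides with token membership because the 8 words are nonempty, delimiter-free and none equals the removed domain token.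
import Mathlib
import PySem

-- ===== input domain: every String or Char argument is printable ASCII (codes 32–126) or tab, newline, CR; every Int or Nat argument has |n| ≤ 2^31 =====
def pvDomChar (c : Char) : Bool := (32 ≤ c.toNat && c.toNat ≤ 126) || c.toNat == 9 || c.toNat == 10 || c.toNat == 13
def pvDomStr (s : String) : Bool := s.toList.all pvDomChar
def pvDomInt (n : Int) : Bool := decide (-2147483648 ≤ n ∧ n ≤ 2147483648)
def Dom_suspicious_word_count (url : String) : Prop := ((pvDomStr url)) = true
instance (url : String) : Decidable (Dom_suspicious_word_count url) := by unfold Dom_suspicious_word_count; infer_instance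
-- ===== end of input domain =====

-- B replaces A's nested split/dedup tokenization by a direct delimiter-bounded substring
-- search for each of the 8 words (objective: alternative algorithm, no tokens built).

-- ===== PORT A =====
-- str(url.encode('utf-8')) — exact on Dom (ASCII 32–126 plus tab/newline/CR): utf-8 encoding is
-- the identity there and bytes.__repr__ wraps in b'…' (or b"…" when the bytes contain ' but no "),
-- escaping \ ' \t \n \r.
def pyBytesRepr (cs : List Char) : List Char :=
  let q : Char := if ('\'' ∈ cs) ∧ ('"' ∉ cs) then '"' else '\''
  ['b', q] ++ (cs.flatMap (fun c =>
    if c = '\\' then ['\\', '\\']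
    else if c = q then ['\\', q]
    else if c = '\t' then ['\\', 't']
    else if c = '\n' then ['\\', 'n']
    else if c = '\r' then ['\\', 'r']
    else [c])) ++ [q]

-- getTokens: split by '/', then each piece by '-', then each of those by '.';
-- list(set(...)) is PySem.Set.ofList (order unobserved: the result is only used for membership);
-- allTokens.remove('com') after dedup is List.erase of the single occurrence.
def getTokens (url : String) : List (List Char) :=
  let tokensBySlash := PySem.Chars.splitOn (pyBytesRepr url.toList) ['/']
  let allTokens := tokensBySlash.foldl (fun allTokens i =>
    let tokens := PySem.Chars.splitOn i ['-']
    let tokensByDot := tokens.foldl (fun tokensByDot j =>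
      tokensByDot ++ PySem.Chars.splitOn j ['.']) []
    allTokens ++ tokens ++ tokensByDot) []
  let allTokens := PySem.Set.ofList allTokens
  if ('c' :: 'o' :: 'm' :: []) ∈ allTokens then allTokens.erase ('c' :: 'o' :: 'm' :: [])
  else allTokens

def pvSecWords : List (List Char) :=
  [['c','o','n','f','i','r','m'], ['a','c','c','o','u','n','t'], ['b','a','n','k','i','n','g'],
   ['s','e','c','u','r','e'], ['e','b','a','y','i','s','a','p','i'], ['w','e','b','s','c','r'],
   ['l','o','g','i','n'], ['s','i','g','n','i','n']]

def suspicious_word_count (url : String) : Int :=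
  let tokens_words := getTokens url
  pvSecWords.foldl (fun cnt ele => if ele ∈ tokens_words then cnt + 1 else cnt) 0

-- ===== PORT B =====
-- B's own computation of str(url.encode('utf-8')) (same value as A's helper, written as a recursion)
def pvEscape (q : Char) : List Char → List Char
  | [] => []
  | c :: cs =>
    (if c == '\\' then ['\\', '\\']
     else if c == q then ['\\', q]
     else if c == '\t' then ['\\', 't']
     else if c == '\n' then ['\\', 'n']
     else if c == '\r' then ['\\', 'r']
     else [c]) ++ pvEscape q cs

def pvReprB (cs : List Char) : List Char :=
  let q : Char := if cs.contains '\'' && !cs.contains '"' then '"' else '\''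
  'b' :: q :: (pvEscape q cs ++ [q])

def pvDelimB (c : Char) : Bool := c == '-' || c == '.' || c == '/'

-- any(s[i:i+m] == w and (i == 0 or s[i-1] in '-./') and (i+m == n or s[i+m] in '-./')
--     for i in range(n - m + 1)); the indices i-1, i+m are in range where they are read
def pvHit (s : List Char) (n : Int) (wl : List Char) : Bool :=
  let m : Int := wl.length
  (PySem.List.pyRange 0 (n - m + 1) 1).any fun i =>
    (PySem.List.slice s (some i) (some (i + m)) == wl)
    && (i == 0 || ((PySem.List.pyGet? s (i - 1)).map pvDelimB).getD false)
    && (i + m == n || ((PySem.List.pyGet? s (i + m)).map pvDelimB).getD false)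

def suspicious_word_count_alt (url : String) : Int :=
  let s := pvReprB url.toList
  let n : Int := s.length
  (["confirm", "account", "banking", "secure", "ebayisapi", "webscr", "login", "signin"].map
    (fun w => if pvHit s n w.toList then (1 : Int) else 0)).sum

-- ===== PRECONDITION & SPEC =====
def Spec_suspicious_word_count (url : String) (out : Int) : Prop := out = suspicious_word_count_alt url
instance (url : String) (out : Int) : Decidable (Spec_suspicious_word_count url out) := by unfold Spec_suspicious_word_count; infer_instance

-- ===== CLAIM (what is proved, stated in full; the proofs are below) =====
def Claim_equal_suspicious_word_count : Prop := ∀ (url : String), Dom_suspicious_word_count url → Spec_suspicious_word_count url (suspicious_word_count url)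

-- ===== LEMMAS AND PROOFS =====

def pvIsDelim (c : Char) : Bool := c = '-' || c = '.' || c = '/'

-- reference split on a character predicate
def splitP (d : Char → Bool) : List Char → List (List Char)
  | [] => [[]]
  | c :: cs => if d c then [] :: splitP d cs else (splitP d cs).modifyHead (c :: ·)

theorem splitP_ne_nil (d : Char → Bool) (l : List Char) : splitP d l ≠ [] := by
  induction l with
  | nil => simp [splitP]
  | cons c cs ih =>
    simp only [splitP]
    split
    · simp
    · cases h : splitP d cs with
      | nil => exact absurd h ih
      | cons a t => simp

theorem splitOn_go_eq (c : Char) (l : List Char) : ∀ (fuel : Nat) (cur : List Char)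
    (acc : List (List Char)), l.length ≤ fuel →
    PySem.Chars.splitOn.go [c] fuel l cur acc =
      acc.reverse ++ (splitP (· = c) l).modifyHead (cur.reverse ++ ·) := by
  induction l with
  | nil =>
    intro fuel cur acc _
    cases fuel <;> simp [PySem.Chars.splitOn.go, splitP, List.modifyHead]
  | cons a rest ih =>
    intro fuel cur acc hf
    cases fuel with
    | zero => simp at hf
    | succ f =>
      by_cases hac : a = c
      · subst hac
        have hpre : List.isPrefixOf [a] (a :: rest) = true := by
          simp [List.isPrefixOf]
        simp only [PySem.Chars.splitOn.go, hpre, if_pos, List.length_singleton,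
          List.drop_succ_cons, List.drop_zero]
        rw [ih f [] (cur.reverse :: acc) (by simpa using Nat.le_of_succ_le_succ hf)]
        simp only [splitP, decide_true, if_pos, List.reverse_cons, List.reverse_nil,
          List.nil_append, List.append_assoc, List.cons_append]
        cases splitP (fun x => decide (x = a)) rest <;> simp [List.modifyHead]
      · have hpre : List.isPrefixOf [c] (a :: rest) = false := by
          simp only [List.isPrefixOf, Bool.and_true]
          exact beq_false_of_ne (fun h => hac h.symm)
        simp only [PySem.Chars.splitOn.go, hpre, Bool.false_eq_true, if_neg, not_false_iff]
        rw [ih f (a :: cur) acc (by simpa using Nat.le_of_succ_le_succ hf)]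
        have : splitP (· = c) (a :: rest) = (splitP (· = c) rest).modifyHead (a :: ·) := by
          simp [splitP, hac]
        rw [this]
        cases h : splitP (· = c) rest with
        | nil => exact absurd h (splitP_ne_nil _ _)
        | cons x t => simp [List.modifyHead]

theorem splitOn_eq_splitP (s : List Char) (c : Char) :
    PySem.Chars.splitOn s [c] = splitP (· = c) s := by
  rw [PySem.Chars.splitOn, splitOn_go_eq c s (s.length + 1) [] [] (Nat.le_succ _)]
  cases splitP (· = c) s <;> simp [List.modifyHead]

-- splitting on p, then each piece on q, is splitting on their disjunction
theorem splitP_compose (p q : Char → Bool) (s : List Char) :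
    (splitP p s).flatMap (splitP q) = splitP (fun c => p c || q c) s := by
  induction s with
  | nil => simp [splitP]
  | cons a cs ih =>
    by_cases hp : p a
    · simp only [splitP, hp, if_pos, Bool.true_or, List.flatMap_cons]
      rw [← ih]; simp
    · cases h : splitP p cs with
      | nil => exact absurd h (splitP_ne_nil _ _)
      | cons x t =>
        by_cases hq : q a
        · simp only [splitP, hp, Bool.false_eq_true, if_neg, not_false_iff, hq, Bool.false_or,
            if_pos, h, List.modifyHead, List.flatMap_cons]
          rw [← ih, h]
          simp [List.flatMap_cons]
        · simp only [splitP, hp, hq, Bool.false_eq_true, if_neg, not_false_iff, Bool.false_or, h,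
            List.modifyHead, List.flatMap_cons]
          rw [← ih, h]
          cases hx : splitP q x with
          | nil => exact absurd hx (splitP_ne_nil _ _)
          | cons y u => simp [hx, List.flatMap_cons]

-- a piece containing no delimiter splits into itself
theorem splitP_eq_self (d : Char → Bool) (w : List Char) (h : ∀ c ∈ w, d c = false) :
    splitP d w = [w] := by
  induction w with
  | nil => simp [splitP]
  | cons a cs ih =>
    have ha := h a (by simp)
    simp only [splitP, ha, Bool.false_eq_true, if_neg, not_false_iff]
    rw [ih (fun c hc => h c (by simp [hc]))]
    simp [List.modifyHead]

-- A's token list, flattened: membership = membership in the single split on all three delimiters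
theorem getTokens_mem (url : String) (w : List Char)
    (hw : ∀ c ∈ w, pvIsDelim c = false) (hcom : w ≠ ['c','o','m']) :
    (w ∈ getTokens url ↔ w ∈ splitP pvIsDelim (pyBytesRepr url.toList)) := by
  unfold getTokens
  simp only [List.append_assoc, PySem.List.foldl_append_eq_flatMap, List.nil_append]
  have hmem : ∀ (L : List (List Char)), w ∈ PySem.Set.ofList L ↔ w ∈ L := fun L =>
    PySem.Set.mem_ofList L w
  have herase : ∀ (L : PySem.Set (List Char)),
      w ∈ L.erase ['c','o','m'] ↔ w ∈ L := fun L => List.mem_erase_of_ne hcom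
  have hstep : w ∈ ((PySem.Chars.splitOn (pyBytesRepr url.toList) ['/']).flatMap
        (fun i => PySem.Chars.splitOn i ['-'] ++
          (PySem.Chars.splitOn i ['-']).flatMap (fun j => PySem.Chars.splitOn j ['.'])))
      ↔ w ∈ splitP pvIsDelim (pyBytesRepr url.toList) := by
    have hdot : ∀ c ∈ w, (c = '.' : Bool) = false := by
      intro c hc
      have := hw c hc
      simp only [pvIsDelim, Bool.or_eq_false_iff] at this
      exact this.1.2
    have hpiece : ∀ (i : List Char),
        (w ∈ PySem.Chars.splitOn i ['-'] ++
            (PySem.Chars.splitOn i ['-']).flatMap (fun j => PySem.Chars.splitOn j ['.'])) ↔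
          w ∈ (PySem.Chars.splitOn i ['-']).flatMap (fun j => PySem.Chars.splitOn j ['.']) := by
      intro i
      simp only [List.mem_append]
      constructor
      · rintro (h | h)
        · refine List.mem_flatMap.mpr ⟨w, h, ?_⟩
          rw [splitOn_eq_splitP, splitP_eq_self _ _ hdot]
          simp
        · exact h
      · exact Or.inr
    rw [List.mem_flatMap]
    constructor
    · rintro ⟨i, hi, hwi⟩
      have : w ∈ (PySem.Chars.splitOn i ['-']).flatMap (fun j => PySem.Chars.splitOn j ['.']) :=
        (hpiece i).mp hwi
      have hflat : w ∈ ((PySem.Chars.splitOn (pyBytesRepr url.toList) ['/']).flatMap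
          (fun i => (PySem.Chars.splitOn i ['-']).flatMap (fun j => PySem.Chars.splitOn j ['.']))) :=
        List.mem_flatMap.mpr ⟨i, hi, this⟩
      revert hflat
      simp only [splitOn_eq_splitP, splitP_compose]
      intro hflat
      convert hflat using 2
      funext c
      simp only [pvIsDelim]
      ac_rfl
    · intro hflat
      have : w ∈ ((PySem.Chars.splitOn (pyBytesRepr url.toList) ['/']).flatMap
          (fun i => (PySem.Chars.splitOn i ['-']).flatMap (fun j => PySem.Chars.splitOn j ['.']))) := by
        revert hflat
        simp only [splitOn_eq_splitP, splitP_compose]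
        intro hflat
        convert hflat using 2
        funext c
        simp only [pvIsDelim]
        ac_rfl
      obtain ⟨i, hi, hwi⟩ := List.mem_flatMap.mp this
      exact ⟨i, hi, (hpiece i).mpr hwi⟩
  split
  · rw [herase, hmem, hstep]
  · rw [hmem, hstep]

-- B's repr computes the same string as A's
theorem pvEscape_eq (q : Char) (cs : List Char) :
    pvEscape q cs = cs.flatMap (fun c =>
      if c = '\\' then ['\\', '\\']
      else if c = q then ['\\', q]
      else if c = '\t' then ['\\', 't']
      else if c = '\n' then ['\\', 'n']
      else if c = '\r' then ['\\', 'r']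
      else [c]) := by
  induction cs with
  | nil => simp [pvEscape]
  | cons c cs ih => simp [pvEscape, ih, beq_iff_eq]

theorem pvReprB_eq (cs : List Char) : pvReprB cs = pyBytesRepr cs := by
  have h2 : ∀ q : Char, 'b' :: q :: (pvEscape q cs ++ [q]) =
      ['b', q] ++ (cs.flatMap (fun c =>
        if c = '\\' then ['\\', '\\']
        else if c = q then ['\\', q]
        else if c = '\t' then ['\\', 't']
        else if c = '\n' then ['\\', 'n']
        else if c = '\r' then ['\\', 'r']
        else [c])) ++ [q] := by
    intro q
    rw [pvEscape_eq]
    simp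
  unfold pvReprB pyBytesRepr
  have hq : (cs.contains '\'' && !cs.contains '"') = true ↔ (('\'' ∈ cs) ∧ ('"' ∉ cs)) := by
    simp
  by_cases h : ('\'' ∈ cs) ∧ ('"' ∉ cs)
  · rw [if_pos (hq.mpr h), if_pos h]; exact h2 '"'
  · rw [if_neg (fun hb => h (hq.mp hb)), if_neg h]; exact h2 '\''

theorem pvDelimB_eq : pvDelimB = pvIsDelim := by
  funext c
  by_cases h1 : c = '-' <;> by_cases h2 : c = '.' <;> by_cases h3 : c = '/' <;>
    simp [pvDelimB, pvIsDelim, h1, h2, h3]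

theorem getLast?_cons_ne {α : Type} (c : α) (l : List α) (h : l ≠ []) :
    (c :: l).getLast? = l.getLast? := by
  cases l with
  | nil => exact absurd rfl h
  | cons b t => exact List.getLast?_cons_cons

-- head of splitP is the delimiter-free prefix
theorem splitP_head (d : Char → Bool) (s : List Char) :
    splitP d s = (s.takeWhile fun c => !d c) :: (splitP d s).tail := by
  induction s with
  | nil => simp [splitP]
  | cons c cs ih =>
    by_cases hc : d c
    · simp [splitP, hc]
    · rw [List.takeWhile_cons_of_pos (by simp [hc])]
      simp only [splitP, hc, Bool.false_eq_true, if_neg, not_false_iff]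
      rw [ih]
      simp [List.modifyHead]

-- the occurrence predicate: w appears in s bounded by delimiters / string ends
def pvOcc (d : Char → Bool) (s w : List Char) : Prop :=
  ∃ pre post, s = pre ++ w ++ post ∧ pre.getLast?.all d = true ∧ post.head?.all d = true

theorem head?_dropWhile_all (d : Char → Bool) (s : List Char) :
    ((s.dropWhile fun c => !d c).head?.all d) = true := by
  induction s with
  | nil => simp
  | cons c cs ih =>
    by_cases hc : d c
    · simp [hc]
    · simpa [hc] using ih

-- tail tokens come with a delimiter immediately before them
theorem splitP_tail_occ (d : Char → Bool) (w : List Char) :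
    ∀ (s : List Char), w ∈ (splitP d s).tail →
      ∃ pre post, s = pre ++ w ++ post ∧ (∃ c, pre.getLast? = some c ∧ d c = true) ∧
        post.head?.all d = true := by
  intro s
  induction s with
  | nil => simp [splitP]
  | cons c cs ih =>
    by_cases hc : d c
    · simp only [splitP, hc, if_pos, List.tail_cons]
      intro hmem
      rw [splitP_head d cs] at hmem
      rcases List.mem_cons.mp hmem with hhd | htl
      · refine ⟨[c], cs.dropWhile (fun x => !d x), ?_, ⟨c, by simp, hc⟩,
          head?_dropWhile_all d cs⟩
        subst hhd
        simp [List.takeWhile_append_dropWhile]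
      · obtain ⟨pre', post', hdec, ⟨c', hlast, hdc⟩, hpost⟩ := ih (by
          rw [splitP_head d cs]; exact htl)
        have hpre' : pre' ≠ [] := by
          intro h; rw [h] at hlast; simp at hlast
        refine ⟨c :: pre', post', by simp [hdec], ⟨c', ?_, hdc⟩, hpost⟩
        rw [getLast?_cons_ne c pre' hpre']; exact hlast
    · intro hmem
      have hsplit : splitP d (c :: cs) = (splitP d cs).modifyHead (c :: ·) := by
        simp [splitP, hc]
      rw [hsplit] at hmem
      rw [splitP_head d cs] at hmem
      simp only [List.modifyHead, List.tail_cons] at hmem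
      obtain ⟨pre', post', hdec, ⟨c', hlast, hdc⟩, hpost⟩ := ih (by
        rw [splitP_head d cs]; exact hmem)
      have hpre' : pre' ≠ [] := by
        intro h; rw [h] at hlast; simp at hlast
      refine ⟨c :: pre', post', by simp [hdec], ⟨c', ?_, hdc⟩, hpost⟩
      rw [getLast?_cons_ne c pre' hpre']; exact hlast

theorem takeWhile_of_bounded (d : Char → Bool) (w post : List Char)
    (hfree : ∀ c ∈ w, d c = false) (hpost : post.head?.all d = true) :
    ((w ++ post).takeWhile fun c => !d c) = w := by
  induction w with
  | nil =>
    cases post with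
    | nil => simp
    | cons c p =>
      simp only [Option.all_some, List.head?_cons] at hpost
      simp [hpost]
  | cons a w' ih =>
    rw [List.cons_append, List.takeWhile_cons_of_pos (by simp [hfree a (by simp)])]
    rw [ih (fun c hc => hfree c (by simp [hc]))]

-- a delimiter-bounded occurrence with nonempty left context yields a tail token
theorem occ_tail_mem (d : Char → Bool) (w post : List Char)
    (hfree : ∀ c ∈ w, d c = false) (hpost : post.head?.all d = true) :
    ∀ (pre : List Char) (c' : Char), pre.getLast? = some c' → d c' = true →
      w ∈ (splitP d (pre ++ w ++ post)).tail := by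
  intro pre
  induction pre with
  | nil => intro c' h; simp at h
  | cons c pre' ih =>
    intro c' hlast hdc
    rw [show (c :: pre') ++ w ++ post = c :: (pre' ++ w ++ post) by simp]
    by_cases hpre' : pre' = []
    · subst hpre'
      simp only [List.getLast?_singleton, Option.some.injEq] at hlast
      subst hlast
      simp only [List.nil_append, splitP, hdc, if_pos, List.tail_cons]
      rw [splitP_head d (w ++ post)]
      exact List.mem_cons.mpr (Or.inl (takeWhile_of_bounded d w post hfree hpost).symm)
    · rw [getLast?_cons_ne c pre' hpre'] at hlast
      have hmem' : w ∈ (splitP d (pre' ++ w ++ post)).tail := ih c' hlast hdc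
      by_cases hc : d c
      · simp only [splitP, hc, if_pos, List.tail_cons]
        rw [splitP_head d (pre' ++ w ++ post)]
        exact List.mem_cons_of_mem _ hmem'
      · have hsplit : splitP d (c :: (pre' ++ w ++ post)) =
            (splitP d (pre' ++ w ++ post)).modifyHead (c :: ·) := by
          simp [splitP, hc]
        rw [hsplit, splitP_head d (pre' ++ w ++ post)]
        simpa [List.modifyHead] using hmem'

-- tokens = delimiter-bounded occurrences (for a nonempty delimiter-free word)
theorem mem_splitP_iff_occ (d : Char → Bool) (s w : List Char)
    (hfree : ∀ c ∈ w, d c = false) :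
    (w ∈ splitP d s ↔ pvOcc d s w) := by
  constructor
  · intro hmem
    rw [splitP_head d s] at hmem
    rcases List.mem_cons.mp hmem with hhd | htl
    · refine ⟨[], s.dropWhile (fun c => !d c), ?_, by simp, head?_dropWhile_all d s⟩
      subst hhd
      simp [List.takeWhile_append_dropWhile]
    · obtain ⟨pre, post, hdec, ⟨c', hlast, hdc⟩, hpost⟩ := splitP_tail_occ d w s (by
        rw [splitP_head d s]; exact htl)
      exact ⟨pre, post, hdec, by simp [hlast, hdc], hpost⟩
  · rintro ⟨pre, post, hdec, hpre, hpost⟩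
    subst hdec
    cases hlast : pre.getLast? with
    | none =>
      have : pre = [] := by
        cases pre with
        | nil => rfl
        | cons a l => simp [List.getLast?_cons] at hlast
      subst this
      rw [splitP_head d ([] ++ w ++ post)]
      simp only [List.nil_append]
      exact List.mem_cons.mpr (Or.inl (takeWhile_of_bounded d w post hfree hpost).symm)
    | some c' =>
      rw [hlast] at hpre
      simp only [Option.all_some] at hpre
      have htail := occ_tail_mem d w post hfree hpost pre c' hlast hpre
      rw [splitP_head d (pre ++ w ++ post)]
      exact List.mem_cons_of_mem _ htail

-- the occurrence predicate is exactly what pvHit scans for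
theorem pvHit_iff_occ (s w : List Char) :
    (pvHit s (s.length : Int) w = true ↔ pvOcc pvIsDelim s w) := by
  unfold pvHit
  rw [List.any_eq_true]
  constructor
  · rintro ⟨i, hi, hPi⟩
    rw [PySem.List.mem_pyRange_one] at hi
    obtain ⟨hi0, hilt⟩ := hi
    obtain ⟨j, rfl⟩ : ∃ j : Nat, (j : Int) = i := ⟨i.toNat, Int.toNat_of_nonneg hi0⟩
    simp only [Bool.and_eq_true, Bool.or_eq_true, beq_iff_eq] at hPi
    obtain ⟨⟨hslice, hleft⟩, hright⟩ := hPi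
    have hslice' : (s.drop j).take w.length = w := by
      rw [show ((j : Int) + (w.length : Int)) = ((j : Int) + ((w.length : Nat) : Int)) from rfl,
        PySem.List.slice_natCast_add] at hslice
      exact hslice
    have hjm : j + w.length ≤ s.length := by
      have : (j : Int) < (s.length : Int) - (w.length : Int) + 1 := hilt
      omega
    refine ⟨s.take j, s.drop (j + w.length), ?_, ?_, ?_⟩
    · have hdec := (List.take_append_drop w.length (s.drop j)).symm
      rw [List.drop_drop, hslice'] at hdec
      conv_lhs => rw [← List.take_append_drop j s]
      rw [List.append_assoc]
      congr 1
    · -- left boundary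
      by_cases hj0 : j = 0
      · subst hj0; simp
      · have hdl := hleft.resolve_left (by
          intro h; exact hj0 (by exact_mod_cast h))
        have hj1 : ((j : Int) - 1) = ((j - 1 : Nat) : Int) := by omega
        rw [hj1, PySem.List.pyGet?_natCast] at hdl
        have hjlt : j - 1 < s.length := by omega
        rw [List.getElem?_eq_getElem hjlt] at hdl
        simp only [Option.map_some, Option.getD_some] at hdl
        have hlen : (s.take j).length = j := by
          rw [List.length_take]; omega
        rw [List.getLast?_eq_getElem?, hlen]
        rw [List.getElem?_take_of_lt (by omega)]
        rw [List.getElem?_eq_getElem hjlt]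
        simpa [pvDelimB_eq] using hdl
    · -- right boundary
      by_cases hend : j + w.length = s.length
      · rw [hend, List.drop_length]; simp
      · have hdl := hright.resolve_left (by
          intro h; exact hend (by omega))
        have hlt : j + w.length < s.length := by omega
        rw [show ((j : Int) + (w.length : Int)) = ((j + w.length : Nat) : Int) by omega,
          PySem.List.pyGet?_natCast, List.getElem?_eq_getElem hlt] at hdl
        simp only [Option.map_some, Option.getD_some] at hdl
        rw [List.head?_eq_getElem?, List.getElem?_drop]
        rw [List.getElem?_eq_getElem (by omega)]
        simpa [pvDelimB_eq] using hdl
  · rintro ⟨pre, post, rfl, hpre, hpost⟩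
    refine ⟨(pre.length : Int), ?_, ?_⟩
    · rw [PySem.List.mem_pyRange_one]
      constructor
      · positivity
      · simp only [List.length_append]
        push_cast
        have : 0 ≤ (post.length : Int) := by positivity
        omega
    · simp only [Bool.and_eq_true, Bool.or_eq_true, beq_iff_eq]
      refine ⟨⟨?_, ?_⟩, ?_⟩
      · rw [show ((pre.length : Int) + (w.length : Int)) =
            ((pre.length : Nat) : Int) + ((w.length : Nat) : Int) from rfl,
          PySem.List.slice_natCast_add]
        rw [List.append_assoc, List.drop_left, List.take_left]
      · cases pre with
        | nil => simp
        | cons a l =>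
          right
          have hlen : 1 ≤ (a :: l).length := by simp
          rw [show (((a :: l).length : Int) - 1) = (((a :: l).length - 1 : Nat) : Int) by omega,
            PySem.List.pyGet?_natCast]
          obtain ⟨c', hlast⟩ : ∃ c', (a :: l).getLast? = some c' := by
            cases hl : (a :: l).getLast? with
            | none => simp at hl
            | some x => exact ⟨x, rfl⟩
          rw [hlast] at hpre
          simp only [Option.all_some] at hpre
          rw [List.getLast?_eq_getElem?] at hlast
          have hidx : (a :: l).length - 1 < (a :: l).length := by simp
          have h1 : (a :: l).length - 1 < ((a :: l) ++ w).length := by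
            simp only [List.length_append]; omega
          rw [List.getElem?_append_left h1, List.getElem?_append_left hidx, hlast]
          simp [pvDelimB_eq, hpre]
      · cases post with
        | nil =>
          left
          simp [List.length_append]
        | cons b p =>
          right
          simp only [Option.all_some, List.head?_cons] at hpost
          rw [show ((pre.length : Int) + (w.length : Int)) =
              (((pre ++ w).length : Nat) : Int) by simp,
            PySem.List.pyGet?_natCast]
          rw [show pre ++ w ++ (b :: p) = (pre ++ w) ++ (b :: p) by simp,
            List.getElem?_append_right (le_refl _)]
          simp [pvDelimB_eq, hpost]

-- the two counts agree word by word
theorem count_eq (L : List (List Char)) (P : List Char → Bool) (ws : List (List Char))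
    (h : ∀ w ∈ ws, (w ∈ L ↔ P w = true)) :
    ws.foldl (fun cnt ele => if ele ∈ L then cnt + 1 else cnt) (0 : Int) =
      (ws.map (fun w => if P w then (1 : Int) else 0)).sum := by
  have hgen : ∀ (ws' : List (List Char)) (a : Int), (∀ w ∈ ws', (w ∈ L ↔ P w = true)) →
      ws'.foldl (fun cnt ele => if ele ∈ L then cnt + 1 else cnt) a =
        a + (ws'.map (fun w => if P w then (1 : Int) else 0)).sum := by
    intro ws'
    induction ws' with
    | nil => simp
    | cons x t ih =>
      intro a hx
      simp only [List.map_cons, List.foldl_cons, List.sum_cons]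
      rw [ih _ (fun w hw => hx w (by simp [hw]))]
      by_cases hm : x ∈ L
      · rw [if_pos hm, if_pos ((hx x (by simp)).mp hm)]; ring
      · rw [if_neg hm, if_neg (fun hc => hm ((hx x (by simp)).mpr hc))]; ring
  simpa using hgen ws 0 h

-- ===== VERDICT (by name: the statement is the Claim_ definition above) =====
set_option maxRecDepth 4096 in
theorem suspicious_word_count_spec : Claim_equal_suspicious_word_count := by
  intro url _
  unfold Spec_suspicious_word_count suspicious_word_count suspicious_word_count_alt
  rw [pvReprB_eq]
  show pvSecWords.foldl (fun cnt ele => if ele ∈ getTokens url then cnt + 1 else cnt) 0 =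
    (pvSecWords.map (fun wl => if pvHit (pyBytesRepr url.toList)
      ((pyBytesRepr url.toList).length : Int) wl then (1 : Int) else 0)).sum
  apply count_eq
  intro w hw
  simp only [pvSecWords, List.mem_cons, List.not_mem_nil, or_false] at hw
  have hfree : ∀ c ∈ w, pvIsDelim c = false := by
    rcases hw with rfl | rfl | rfl | rfl | rfl | rfl | rfl | rfl <;>
      (intro c hc; fin_cases hc <;> rfl)
  have hcom : w ≠ ['c','o','m'] := by
    rcases hw with rfl | rfl | rfl | rfl | rfl | rfl | rfl | rfl <;> simp
  rw [getTokens_mem url w hfree hcom]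
  rw [mem_splitP_iff_occ pvIsDelim (pyBytesRepr url.toList) w hfree]
  exact (pvHit_iff_occ (pyBytesRepr url.toList) w).symm
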